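-- pv_equiv track=rewrite | github.com/Bhardwaj-Saurabh/FullStack_Data_Science_BootCamp | Python_advance/assignment4.py | uncensor
-- ===== SOURCE A (Python) =====
-- def uncensor(my_string, lost_vowels):
--
--     true_string = ''
--     n = 0
--     for letter in my_string:
--         if letter != '*':
--             true_string += letter
--         else:
--             true_string += lost_vowels[n]
--             n += 1
--
--     return true_string
-- ===== SOURCE B (Python) =====
-- def uncensor(my_string, lost_vowels):
--     parts = my_string.split('*')
--     result = parts[0]
--     for i in range(1, len(parts)):
--         result += lost_vowels[i - 1] + parts[i]
--     return result
-- ===== Notes on version B (the rewrite author's own statement) =====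
-- stated objective: faster
-- what changed: B splits the string on '*' once (one C-level split) and rebuilds the result by interleaving successive vowels between the precomputed segments, instead of scanning character-by-character with a star counter.
import Mathlib
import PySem

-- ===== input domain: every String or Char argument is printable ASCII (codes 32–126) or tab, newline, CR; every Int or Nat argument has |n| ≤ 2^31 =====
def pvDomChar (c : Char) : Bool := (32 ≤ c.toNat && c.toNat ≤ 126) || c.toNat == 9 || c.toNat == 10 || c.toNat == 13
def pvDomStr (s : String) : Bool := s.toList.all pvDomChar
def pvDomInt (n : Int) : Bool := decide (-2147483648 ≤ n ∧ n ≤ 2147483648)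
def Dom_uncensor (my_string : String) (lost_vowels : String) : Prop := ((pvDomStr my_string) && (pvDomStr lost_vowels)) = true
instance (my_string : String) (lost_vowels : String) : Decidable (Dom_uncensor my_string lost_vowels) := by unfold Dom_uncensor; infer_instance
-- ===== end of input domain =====

-- B rebuilds the string from the '*'-split segments with vowels interleaved, instead of a per-character scan with a counter (measured constant-factor speedup).


-- ===== PORT A =====
def uncensor (my_string : String) (lost_vowels : String) : String :=
  String.ofList
    (my_string.toList.foldl
      (fun (st : List Char × Nat) (letter : Char) =>
        if letter ≠ '*' then (st.1 ++ [letter], st.2)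
        else (st.1 ++ [PySem.List.pyGetD lost_vowels.toList (st.2 : Int) '?'], st.2 + 1))
      ([], 0)).1

-- ===== PORT B =====
def uncensor_alt (my_string : String) (lost_vowels : String) : String :=
  let parts := PySem.Chars.splitOn my_string.toList ['*']
  String.ofList
    ((PySem.List.pyRange 1 (parts.length : Int) 1).foldl
      (fun (result : List Char) (i : Int) =>
        result ++ [PySem.List.pyGetD lost_vowels.toList (i - 1) '?'] ++ PySem.List.pyGetD parts i [])
      (PySem.List.pyGetD parts 0 []))

-- ===== PRECONDITION & SPEC =====
-- Pre_ excludes exactly the inputs where the string has more '*'s than there are lost vowels: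
-- there both Pythons raise IndexError (A at lost_vowels[n], B at lost_vowels[i-1]).
def Pre_uncensor (my_string : String) (lost_vowels : String) : Prop :=
  my_string.toList.count '*' ≤ lost_vowels.toList.length
instance (my_string : String) (lost_vowels : String) : Decidable (Pre_uncensor my_string lost_vowels) := by
  unfold Pre_uncensor; infer_instance
def pvWitness_uncensor : String × String := ("wh*r* did my v*w*ls g*?", "eeoeo")
def Spec_uncensor (my_string : String) (lost_vowels : String) (out : String) : Prop := out = uncensor_alt my_string lost_vowels
instance (my_string : String) (lost_vowels : String) (out : String) : Decidable (Spec_uncensor my_string lost_vowels out) := by unfold Spec_uncensor; infer_instance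

-- ===== CLAIM (what is proved, stated in full; the proofs are below) =====
def Claim_equal_uncensor : Prop := ∀ (my_string : String) (lost_vowels : String), Dom_uncensor my_string lost_vowels → Pre_uncensor my_string lost_vowels → Spec_uncensor my_string lost_vowels (uncensor my_string lost_vowels)

-- ===== LEMMAS AND PROOFS =====

-- A's scan, as a structural recursion (vs = lost vowels, n = stars consumed so far).
def recA (vs : List Char) : List Char → Nat → List Char
  | [], _ => []
  | c :: cs, n =>
      if c ≠ '*' then c :: recA vs cs n
      else PySem.List.pyGetD vs (n : Int) '?' :: recA vs cs (n + 1)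

-- split on '*' with an explicit current-segment accumulator (mirrors PySem.Chars.splitOn.go).
def mySplit : List Char → List Char → List (List Char)
  | [], cur => [cur.reverse]
  | c :: cs, cur => if c = '*' then cur.reverse :: mySplit cs [] else mySplit cs (c :: cur)

-- vowels interleaved between the remaining segments, starting at vowel index n.
def glueRest (vs : List Char) : List (List Char) → Int → List Char
  | [], _ => []
  | q :: qs, n => PySem.List.pyGetD vs n '?' :: (q ++ glueRest vs qs (n + 1))

def glue (vs : List Char) : List (List Char) → Int → List Char
  | [], _ => []
  | p :: ps, n => p ++ glueRest vs ps n

theorem mySplit_ne_nil (cs cur : List Char) : mySplit cs cur ≠ [] := by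
  induction cs generalizing cur with
  | nil => simp [mySplit]
  | cons c cs ih => by_cases h : c = '*' <;> simp [mySplit, h, ih]

theorem go_spec (fuel : Nat) (l cur : List Char) (acc : List (List Char))
    (h : l.length ≤ fuel) :
    PySem.Chars.splitOn.go ['*'] (fuel + 1) l cur acc = acc.reverse ++ mySplit l cur := by
  induction l generalizing fuel cur acc with
  | nil => simp [PySem.Chars.splitOn.go, mySplit]
  | cons c rest ih =>
    obtain ⟨fuel', rfl⟩ : ∃ f', fuel = f' + 1 := by
      cases fuel with
      | zero => simp at h
      | succ f => exact ⟨f, rfl⟩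
    have hrest : rest.length ≤ fuel' := by simp at h; omega
    by_cases hc : c = '*'
    · subst hc
      rw [show PySem.Chars.splitOn.go ['*'] (fuel' + 1 + 1) ('*' :: rest) cur acc
            = PySem.Chars.splitOn.go ['*'] (fuel' + 1) rest [] (cur.reverse :: acc) by
          simp [PySem.Chars.splitOn.go, List.isPrefixOf]]
      rw [ih fuel' [] (cur.reverse :: acc) hrest]
      simp [mySplit]
    · have hc' : ¬ ('*' = c) := fun h => hc h.symm
      rw [show PySem.Chars.splitOn.go ['*'] (fuel' + 1 + 1) (c :: rest) cur acc
            = PySem.Chars.splitOn.go ['*'] (fuel' + 1) rest (c :: cur) acc by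
          simp [PySem.Chars.splitOn.go, List.isPrefixOf, hc']]
      rw [ih fuel' (c :: cur) acc hrest]
      simp [mySplit, hc]

theorem splitOn_eq (cs : List Char) : PySem.Chars.splitOn cs ['*'] = mySplit cs [] := by
  rw [PySem.Chars.splitOn, go_spec cs.length cs [] [] (le_refl _)]
  simp

theorem foldA (vs : List Char) (cs : List Char) (acc : List Char) (n : Nat) :
    (cs.foldl
      (fun (st : List Char × Nat) (letter : Char) =>
        if letter ≠ '*' then (st.1 ++ [letter], st.2)
        else (st.1 ++ [PySem.List.pyGetD vs (st.2 : Int) '?'], st.2 + 1))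
      (acc, n)).1 = acc ++ recA vs cs n := by
  induction cs generalizing acc n with
  | nil => simp [recA]
  | cons c cs ih =>
    simp only [List.foldl_cons]
    by_cases hc : c = '*'
    · subst hc
      rw [if_neg (by simp), ih]
      simp [recA]
    · rw [if_pos (by simp [hc]), ih]
      simp [recA, hc]

theorem glue_mySplit (vs : List Char) (cs cur : List Char) (n : Nat) :
    glue vs (mySplit cs cur) (n : Int) = cur.reverse ++ recA vs cs n := by
  induction cs generalizing cur n with
  | nil => simp [mySplit, glue, glueRest, recA]
  | cons c cs ih =>
    by_cases hc : c = '*'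
    · subst hc
      obtain ⟨q, qs, hq⟩ := List.exists_cons_of_ne_nil (mySplit_ne_nil cs [])
      have h2 := ih [] (n + 1)
      rw [hq] at h2
      simp only [glue, List.reverse_nil, List.nil_append] at h2
      rw [show mySplit ('*' :: cs) cur = cur.reverse :: mySplit cs [] from by simp [mySplit], hq]
      show cur.reverse ++ glueRest vs (q :: qs) (n : Int) = _
      rw [show glueRest vs (q :: qs) (n : Int)
            = PySem.List.pyGetD vs (n : Int) '?' :: (q ++ glueRest vs qs ((n : Int) + 1)) from rfl]
      rw [show ((n : Int) + 1) = ((n + 1 : Nat) : Int) by push_cast; ring]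
      rw [h2]
      simp [recA]
    · simp only [mySplit, if_neg hc]
      rw [ih (c :: cur) n]
      simp [recA, hc]

theorem Bfold (vs : List Char) (parts : List (List Char)) (k : Nat) :
    ∀ (j : Nat) (acc : List Char), 1 ≤ j → parts.length - j ≤ k →
    (PySem.List.pyRange (j : Int) (parts.length : Int) 1).foldl
      (fun (result : List Char) (i : Int) =>
        result ++ [PySem.List.pyGetD vs (i - 1) '?'] ++ PySem.List.pyGetD parts i [])
      acc = acc ++ glueRest vs (parts.drop j) ((j : Int) - 1) := by
  induction k with
  | zero =>
    intro j acc hj hk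
    have hlen : parts.length ≤ j := by omega
    rw [PySem.List.pyRange_one_eq_nil (by exact_mod_cast hlen)]
    simp [List.drop_eq_nil_of_le hlen, glueRest]
  | succ k ih =>
    intro j acc hj hk
    by_cases hlt : j < parts.length
    · rw [PySem.List.pyRange_one_cons (by exact_mod_cast hlt)]
      simp only [List.foldl_cons]
      have hcast : ((j : Int) + 1) = ((j + 1 : Nat) : Int) := by push_cast; ring
      rw [hcast, ih (j + 1) _ (by omega) (by omega)]
      have hget : PySem.List.pyGetD parts (j : Int) [] = parts[j] := by
        simp [PySem.List.pyGetD_natCast, hlt]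
      rw [List.drop_eq_getElem_cons hlt]
      simp only [glueRest, hget]
      have : ((j + 1 : Nat) : Int) - 1 = ((j : Int) - 1) + 1 := by push_cast; ring
      rw [this]
      simp
    · have hlen : parts.length ≤ j := by omega
      rw [PySem.List.pyRange_one_eq_nil (by exact_mod_cast hlen)]
      simp [List.drop_eq_nil_of_le hlen, glueRest]

-- ===== VERDICT (by name: the statement is the Claim_ definition above) =====
theorem uncensor_spec : Claim_equal_uncensor := by
  intro s v _ _
  unfold Spec_uncensor uncensor uncensor_alt
  rw [foldA v.toList s.toList [] 0]
  obtain ⟨p, ps, hp⟩ := List.exists_cons_of_ne_nil (mySplit_ne_nil s.toList [])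
  have h0 : PySem.List.pyGetD (p :: ps) (0 : Int) [] = p := by
    simp [PySem.List.pyGetD_natCast]
  have hb := Bfold v.toList (p :: ps) (p :: ps).length 1 p (le_refl _) (by omega)
  simp only [Nat.cast_one, List.drop_one, List.tail_cons,
    show ((1 : Int) - 1) = (0 : Int) from rfl] at hb
  have hg := glue_mySplit v.toList s.toList [] 0
  rw [hp] at hg
  simp only [glue, List.reverse_nil, List.nil_append, Nat.cast_zero] at hg
  simp only [splitOn_eq, hp, h0]
  rw [hb, hg]
  simp
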